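-- pv_equiv track=rewrite | github.com/kimkimj/Algorithm | python/etc/repeatingBinary.py | solution
-- ===== SOURCE A (Python) =====
-- def solution(s):
--     deleted_zero = 0
--     conversion = 0
--     length = len(s)
--     while s != '1':
--         s = s.replace('0', '')
--         num = len(s)
--         deleted_zero += length - num
--         s = '' + bin(num)[2:]
--         length = len(s)
--         conversion += 1
--
--     return [conversion, deleted_zero]
-- ===== SOURCE B (Python) =====
-- def solution(s):
--     # Recursive decomposition: steps(n) returns (conversions, zeros removed) for the
--     # chain that starts at the binary representation of n, composing results on return.
--     def steps(n):
--         if n == 1: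
--             return (0, 0)
--         c, d = steps(n.bit_count())
--         return (c + 1, d + n.bit_length() - n.bit_count())
--
--     if s == '1':
--         return [0, 0]
--     ones = sum(1 for ch in s if ch != '0')
--     c, d = steps(ones)
--     return [c + 1, d + len(s) - ones]
-- ===== Notes on version B (the rewrite author's own statement) =====
-- stated objective: alternative
-- what changed: Replaces A's accumulator-carrying while loop over freshly built strings (replace/bin/len each iteration) by a recursive pair-returning function on an integer: one pass counts the non-'0' characters, then steps(n) recurses on n.bit_count() and composes (conversions, removed zeros) on the way back up, building no strings and carrying no loop state.
import Mathlib
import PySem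

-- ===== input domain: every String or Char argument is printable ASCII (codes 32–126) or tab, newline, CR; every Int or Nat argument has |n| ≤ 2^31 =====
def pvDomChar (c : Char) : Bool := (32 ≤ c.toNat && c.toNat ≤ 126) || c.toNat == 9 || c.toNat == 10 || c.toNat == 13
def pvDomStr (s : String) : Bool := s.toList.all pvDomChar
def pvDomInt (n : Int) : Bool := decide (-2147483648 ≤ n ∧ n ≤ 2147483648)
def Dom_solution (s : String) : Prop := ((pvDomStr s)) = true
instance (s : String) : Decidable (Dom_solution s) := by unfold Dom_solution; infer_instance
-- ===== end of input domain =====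

-- B replaces A's accumulator-carrying string-rewriting while loop by one counting pass plus a
-- recursive pair-returning function on an integer (alternative decomposition; equal cost).


-- ===== PORT A =====
-- A's while-loop; the fuel only makes the recursion total: under Pre_solution it is never
-- exhausted (after the first iteration the tracked number strictly decreases).
def solutionLoopA : Nat → String → Int → Int → Int → List Int
  | 0, _, _, deleted, conversion => [conversion, deleted]
  | fuel+1, s, length, deleted, conversion =>
    if s = "1" then [conversion, deleted]
    else
      let s1 := PySem.Str.replace s "0" ""          -- s = s.replace('0', '')
      let num : Int := PySem.Str.len s1             -- num = len(s)
      let deleted' := deleted + (length - num)      -- deleted_zero += length - num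
      let s2 := PySem.Str.slice (PySem.Int.pyBin num) (some 2) none   -- s = '' + bin(num)[2:]
      solutionLoopA fuel s2 (PySem.Str.len s2) deleted' (conversion + 1)

def solution (s : String) : List Int :=
  solutionLoopA (s.toList.length + 2) s (PySem.Str.len s) 0 0

-- ===== PORT B =====
-- Source B's recursive steps(n): returns the (conversion, deleted) PAIR for the chain starting at
-- bin(n), composed on return; the fuel argument only makes the recursion total (n.bit_count()
-- strictly decreases below n while n > 1, so fuel n suffices at the call site).
def stepsB : Nat → Nat → Int × Int
  | 0, _ => (0, 0)
  | fuel+1, n =>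
    if n = 1 then (0, 0)
    else
      let p := stepsB fuel (PySem.Int.bitCount (n : Int))
      (p.1 + 1, p.2 + ((PySem.Int.bitLength (n : Int) : Int) - (PySem.Int.bitCount (n : Int) : Int)))

def solution_alt (s : String) : List Int :=
  if s = "1" then [0, 0]
  else
    let ones : Nat := s.toList.countP (fun ch => ch != '0')   -- sum(1 for ch in s if ch != '0')
    let p := stepsB ones ones
    [p.1 + 1, p.2 + ((s.toList.length : Int) - (ones : Int))]

-- ===== PRECONDITION & SPEC =====
-- Pre_ excludes exactly the strings all of whose characters are '0' (including the empty
-- string): on those the Python A (and B) returns nothing (A loops forever, B's recursion bottoms out).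
def Pre_solution (s : String) : Prop := s.toList.any (fun c => c != '0') = true
instance (s : String) : Decidable (Pre_solution s) := by unfold Pre_solution; infer_instance
def pvWitness_solution : String := "100110"

def Spec_solution (s : String) (out : List Int) : Prop := out = solution_alt s
instance (s : String) (out : List Int) : Decidable (Spec_solution s out) := by unfold Spec_solution; infer_instance

-- ===== CLAIM (what is proved, stated in full; the proofs are below) =====
def Claim_equal_solution : Prop := ∀ (s : String), Dom_solution s → Pre_solution s → Spec_solution s (solution s)

-- ===== LEMMAS AND PROOFS =====

-- binary digits of n, in order (= bin(n)[2:] for n : Nat); proof-side characterisation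
def binChars (n : Nat) : List Char :=
  if n ≤ 1 then [Nat.digitChar n]
  else binChars (n / 2) ++ [Nat.digitChar (n % 2)]
decreasing_by exact Nat.div_lt_self (by omega) (by omega)

lemma toDigitsCore_two_eq (fuel : Nat) :
    ∀ (n : Nat) (acc : List Char), n < 2 ^ fuel →
      Nat.toDigitsCore 2 (fuel + 1) n acc = binChars n ++ acc := by
  induction fuel with
  | zero =>
    intro n acc h
    interval_cases n
    simp [Nat.toDigitsCore, binChars]
  | succ fuel ih =>
    intro n acc h
    rw [Nat.toDigitsCore]
    by_cases h2 : n / 2 = 0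
    · have hn : n ≤ 1 := by omega
      simp [h2, binChars, hn, Nat.mod_eq_of_lt (by omega : n < 2)]
    · have hn : ¬ n ≤ 1 := by omega
      rw [if_neg h2, ih (n / 2) _ (by omega : n / 2 < 2 ^ fuel)]
      conv_rhs => rw [binChars]
      simp [hn]

lemma toDigits_two_eq (n : Nat) : Nat.toDigits 2 n = binChars n := by
  have := toDigitsCore_two_eq n n [] (Nat.lt_two_pow_self)
  simpa [Nat.toDigits] using this

lemma replace_go_zero (l : List Char) :
    ∀ (acc : List Char) (fuel : Nat), l.length ≤ fuel →
      PySem.Chars.replace.go ['0'] [] fuel l acc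
        = acc.reverse ++ l.filter (fun c => c != '0') := by
  induction l with
  | nil =>
    intro acc fuel h
    cases fuel <;> simp [PySem.Chars.replace.go]
  | cons c t ih =>
    intro acc fuel h
    match fuel, h with
    | fuel+1, h =>
      rw [PySem.Chars.replace.go]
      have hp : (List.isPrefixOf ['0'] (c :: t)) = ('0' == c) := by
        simp [List.isPrefixOf]
      rw [hp]
      by_cases hc : c = '0'
      · subst hc
        simp [ih acc fuel (by simpa using h)]
      · have hb : ('0' == c) = false := by simp [Ne.symm hc]
        rw [hb]
        simp [ih (c :: acc) fuel (by simpa using h), hc]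

lemma replace_zero_toList (s : String) :
    (PySem.Str.replace s "0" "").toList = s.toList.filter (fun c => c != '0') := by
  rw [PySem.Str.replace]
  have h0 : ("0" : String).toList = ['0'] := rfl
  have he : ("" : String).toList = [] := rfl
  rw [h0, he, String.toList_ofList, PySem.Chars.replace]
  rw [if_neg (by simp)]
  simpa using replace_go_zero s.toList [] s.length (by simp [String.length_toList])

lemma binChars_ne_nil (n : Nat) : binChars n ≠ [] := by
  rw [binChars]
  split <;> simp

lemma binChars_length (n : Nat) (h : 1 ≤ n) :
    (binChars n).length = PySem.Int.bitLength (n : Int) := by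
  induction n using Nat.strong_induction_on with
  | _ n ih =>
    rw [binChars, PySem.Int.bitLength_natCast (by omega)]
    by_cases h1 : n ≤ 1
    · have : n = 1 := by omega
      subst this
      simp
    · rw [if_neg h1]
      simp [ih (n/2) (by omega) (by omega)]

lemma binChars_countP (n : Nat) :
    (binChars n).countP (fun c => c != '0') = PySem.Int.bitCount (n : Int) := by
  induction n using Nat.strong_induction_on with
  | _ n ih =>
    rw [binChars]
    by_cases h1 : n ≤ 1
    · interval_cases n <;> simp [List.countP, Nat.digitChar] <;> decide
    · rw [if_neg h1, PySem.Int.bitCount_natCast (by omega)]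
      rw [List.countP_append, ih (n/2) (by exact Nat.div_lt_self (by omega) (by omega))]
      have : (List.countP (fun c => c != '0') [Nat.digitChar (n % 2)]) = n % 2 := by
        rcases Nat.mod_two_eq_zero_or_one n with h | h <;> rw [h] <;> decide
      omega

lemma binChars_eq_one_iff (n : Nat) : binChars n = ['1'] ↔ n = 1 := by
  constructor
  · intro h
    rw [binChars] at h
    by_cases h1 : n ≤ 1
    · rw [if_pos h1] at h
      interval_cases n
      · exact absurd h (by simp [Nat.digitChar])
      · rfl
    · rw [if_neg h1] at h
      have := binChars_ne_nil (n / 2)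
      rcases List.exists_cons_of_ne_nil this with ⟨a, t, ht⟩
      rw [ht] at h
      simp at h
  · intro h; subst h
    rw [binChars]
    simp [Nat.digitChar]

lemma bitCount_le_self (n : Nat) : PySem.Int.bitCount (n : Int) ≤ n := by
  induction n using Nat.strong_induction_on with
  | _ n ih =>
    by_cases h : n = 0
    · subst h; simp
    · rw [PySem.Int.bitCount_natCast (by omega)]
      have := ih (n/2) (Nat.div_lt_self (by omega) (by omega))
      omega

lemma bitCount_lt_self (n : Nat) (h : 2 ≤ n) : PySem.Int.bitCount (n : Int) < n := by
  rw [PySem.Int.bitCount_natCast (by omega)]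
  have := bitCount_le_self (n/2)
  omega

lemma bitCount_pos (n : Nat) (h : 1 ≤ n) : 1 ≤ PySem.Int.bitCount (n : Int) := by
  induction n using Nat.strong_induction_on with
  | _ n ih =>
    rw [PySem.Int.bitCount_natCast (by omega)]
    rcases Nat.mod_two_eq_zero_or_one n with h2 | h2
    · have := ih (n/2) (Nat.div_lt_self (by omega) (by omega)) (by omega)
      omega
    · omega

lemma slice2_pyBin (k : Nat) :
    PySem.Str.slice (PySem.Int.pyBin (k : Int)) (some 2) none = String.ofList (binChars k) := by
  rw [PySem.Str.slice, String.ofList_inj, PySem.Int.pyBin]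
  rw [PySem.Chars.slice_eq_listSlice, PySem.List.slice_from (a := 2) _ (by norm_num)]
  rw [String.toList_ofList, PySem.Int.toBinChars0b, if_neg (by omega)]
  simpa using (toDigits_two_eq k)

lemma loopA_step_bin (m : Nat) (hm : 1 ≤ m) (fa : Nat) (d c : Int) :
    solutionLoopA (fa + 1) (String.ofList (binChars m)) ((binChars m).length : Int) d c
      = if m = 1 then [c, d]
        else solutionLoopA fa (String.ofList (binChars (PySem.Int.bitCount (m : Int))))
              ((binChars (PySem.Int.bitCount (m : Int))).length : Int)
              (d + ((PySem.Int.bitLength (m : Int) : Int) - (PySem.Int.bitCount (m : Int) : Int)))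
              (c + 1) := by
  rw [solutionLoopA]
  have hone : (String.ofList (binChars m) = "1") ↔ m = 1 := by
    have : ("1" : String) = String.ofList ['1'] := rfl
    rw [this, String.ofList_inj, binChars_eq_one_iff]
  by_cases h1 : m = 1
  · rw [if_pos (hone.mpr h1), if_pos h1]
  · rw [if_neg (fun hh => h1 (hone.mp hh)), if_neg h1]
    have hnum : PySem.Str.len (PySem.Str.replace (String.ofList (binChars m)) "0" "")
        = (PySem.Int.bitCount (m : Int) : Int) := by
      rw [PySem.Str.len_eq, replace_zero_toList, String.toList_ofList]
      rw [← List.countP_eq_length_filter, binChars_countP]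
    simp only [hnum, slice2_pyBin, PySem.Str.len_eq, String.toList_ofList,
      binChars_length m hm]

-- A's loop from the binary string of m equals the pair computed by B's recursion, shifted
-- by the accumulators the loop carries.
lemma loop_eq_steps (m : Nat) (hm : 1 ≤ m) :
    ∀ (fa fb : Nat), m ≤ fa → m ≤ fb → ∀ (d c : Int),
      solutionLoopA fa (String.ofList (binChars m)) ((binChars m).length : Int) d c
        = [c + (stepsB fb m).1, d + (stepsB fb m).2] := by
  induction m using Nat.strong_induction_on with
  | _ m ih =>
    intro fa fb hfa hfb d c
    obtain ⟨fa', rfl⟩ : ∃ k, fa = k + 1 := ⟨fa - 1, by omega⟩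
    obtain ⟨fb', rfl⟩ : ∃ k, fb = k + 1 := ⟨fb - 1, by omega⟩
    rw [loopA_step_bin m hm, stepsB]
    by_cases h1 : m = 1
    · rw [if_pos h1, if_pos h1]
      simp
    · rw [if_neg h1, if_neg h1]
      have hlt := bitCount_lt_self m (by omega)
      have hpos := bitCount_pos m hm
      rw [ih (PySem.Int.bitCount (m : Int)) hlt hpos fa' fb' (by omega) (by omega) _ _]
      simp only [List.cons.injEq, and_true]
      constructor <;> ring

-- ===== VERDICT (by name: the statement is the Claim_ definition above) =====
theorem solution_spec : Claim_equal_solution := by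
  unfold Claim_equal_solution
  intro s _ hpre
  unfold Spec_solution solution solution_alt
  by_cases hs : s = "1"
  · subst hs
    rw [if_pos rfl]
    rw [show (("1" : String).toList.length + 2) = 2 + 1 from rfl, solutionLoopA, if_pos rfl]
  · rw [if_neg hs]
    set L := s.toList with hL
    have hk : 1 ≤ L.countP (fun c => c != '0') := by
      rw [Nat.succ_le_iff, List.countP_pos_iff]
      simpa [Pre_solution, List.any_eq_true] using hpre
    obtain ⟨k, hkdef⟩ : ∃ k, L.countP (fun c => c != '0') = k := ⟨_, rfl⟩
    rw [hkdef] at hk ⊢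
    have hkle : k ≤ L.length := by rw [← hkdef]; exact List.countP_le_length
    rw [show L.length + 2 = (L.length + 1) + 1 from rfl, solutionLoopA, if_neg hs]
    have hrep : PySem.Str.len (PySem.Str.replace s "0" "") = (k : Int) := by
      rw [PySem.Str.len_eq, replace_zero_toList, ← hL,
        ← List.countP_eq_length_filter, hkdef]
    simp only [hrep, slice2_pyBin, PySem.Str.len_eq, String.toList_ofList]
    rw [binChars_length k hk] at *
    rw [← binChars_length k hk]
    rw [loop_eq_steps k hk (L.length + 1) k (by omega) le_rfl _ _]
    simp only [List.cons.injEq, and_true]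
    constructor <;> ring
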